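-- pv_equiv track=rewrite | github.com/Poomon001/Competitive-Programming | club python/Largest Substring Between Two Equal Characters/main.py | maxLengthBetweenEqualCharacters_M1
-- ===== SOURCE A (Python) =====
-- def maxLengthBetweenEqualCharacters_M1(s: str) -> int:
--     maxCount = -1
--
--     if len(s) == 1:
--         return -1
--
--     for i in range(0, len(s)):
--         for j in range(i + 1, len(s)):
--             if s[i] == s[j]:
--                 maxCount = max(maxCount, j - i - 1)
--
--     return maxCount
-- ===== SOURCE B (Python) =====
-- def maxLengthBetweenEqualCharacters_M1(s: str) -> int:
--     first = {}
--     best = -1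
--     for i, c in enumerate(s):
--         if c in first:
--             best = max(best, i - first[c] - 1)
--         else:
--             first[c] = i
--     return best
-- ===== Notes on version B (the rewrite author's own statement) =====
-- stated objective: faster
-- what changed: Replaced the O(n^2) all-pairs double loop with a single pass that records each character's first occurrence in a dict and maximises i - first[c] - 1.
import Mathlib
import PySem

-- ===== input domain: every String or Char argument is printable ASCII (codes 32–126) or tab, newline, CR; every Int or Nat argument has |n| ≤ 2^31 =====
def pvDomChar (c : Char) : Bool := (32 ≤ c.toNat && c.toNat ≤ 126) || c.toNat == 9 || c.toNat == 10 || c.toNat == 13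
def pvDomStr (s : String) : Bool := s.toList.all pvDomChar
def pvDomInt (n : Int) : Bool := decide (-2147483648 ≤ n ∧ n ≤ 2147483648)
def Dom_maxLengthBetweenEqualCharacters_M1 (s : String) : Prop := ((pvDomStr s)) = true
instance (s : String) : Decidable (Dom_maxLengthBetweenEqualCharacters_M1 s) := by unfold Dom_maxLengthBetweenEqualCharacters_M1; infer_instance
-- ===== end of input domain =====

-- B replaces A's all-pairs double loop by a single pass keeping each character's first occurrence in a dict (objective: faster).

-- ===== PORT A =====
def maxLengthBetweenEqualCharacters_M1 (s : String) : Int :=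
  if PySem.Str.len s = 1 then -1
  else
    (PySem.List.pyRange 0 (PySem.Str.len s) 1).foldl
      (fun mc i =>
        (PySem.List.pyRange (i + 1) (PySem.Str.len s) 1).foldl
          (fun mc j =>
            if PySem.List.pyGetD s.toList i ' ' = PySem.List.pyGetD s.toList j ' ' then
              max mc (j - i - 1)
            else mc) mc)
      (-1)

-- ===== PORT B =====
-- one loop step of Source B: `if c in first: best = max(best, i - first[c] - 1) else: first[c] = i`
def pvStepB (st : PySem.Dict Char Int × Int) (p : Int × Char) : PySem.Dict Char Int × Int :=
  match st.1.get? p.2 with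
  | some f => (st.1, max st.2 (p.1 - f - 1))
  | none => (st.1.insert p.2 p.1, st.2)

def maxLengthBetweenEqualCharacters_M1_alt (s : String) : Int :=
  ((PySem.List.enumerate s.toList 0).foldl pvStepB (PySem.Dict.empty, -1)).2

-- ===== PRECONDITION & SPEC =====
def Spec_maxLengthBetweenEqualCharacters_M1 (s : String) (out : Int) : Prop := out = maxLengthBetweenEqualCharacters_M1_alt s
instance (s : String) (out : Int) : Decidable (Spec_maxLengthBetweenEqualCharacters_M1 s out) := by unfold Spec_maxLengthBetweenEqualCharacters_M1; infer_instance

-- ===== CLAIM (what is proved, stated in full; the proofs are below) =====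
def Claim_equal_maxLengthBetweenEqualCharacters_M1 : Prop := ∀ (s : String), Dom_maxLengthBetweenEqualCharacters_M1 s → Spec_maxLengthBetweenEqualCharacters_M1 s (maxLengthBetweenEqualCharacters_M1 s)

-- ===== LEMMAS AND PROOFS =====

-- (i, j) is a pair of equal characters of cs with i < j
def pvGood (cs : List Char) (i j : Nat) : Prop :=
  i < j ∧ j < cs.length ∧ cs.getD i ' ' = cs.getD j ' '

-- c bounds -1 and every gap j - i - 1 of an equal-character pair; both programs return the least such c
def pvBound (cs : List Char) (c : Int) : Prop :=
  -1 ≤ c ∧ ∀ i j : Nat, pvGood cs i j → (j : Int) - (i : Int) - 1 ≤ c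

-- A's inner and outer loop bodies, on a bare character list
def pvInner (cs : List Char) (i : Int) (mc j : Int) : Int :=
  if PySem.List.pyGetD cs i ' ' = PySem.List.pyGetD cs j ' ' then max mc (j - i - 1) else mc

def pvOuter (cs : List Char) (mc i : Int) : Int :=
  (PySem.List.pyRange (i + 1) (cs.length : Int) 1).foldl (pvInner cs i) mc

def pvA (cs : List Char) : Int :=
  if (cs.length : Int) = 1 then -1
  else (PySem.List.pyRange 0 (cs.length : Int) 1).foldl (pvOuter cs) (-1)

lemma pvA_eq (s : String) : maxLengthBetweenEqualCharacters_M1 s = pvA s.toList := rfl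

lemma pv_foldl_mono {α : Type} (g : Int → α → Int) (h : ∀ m x, m ≤ g m x) :
    ∀ (l : List α) (m : Int), m ≤ l.foldl g m := by
  intro l
  induction l with
  | nil => intro m; simp
  | cons x t ih => intro m; exact le_trans (h m x) (ih (g m x))

lemma pv_foldl_le {α : Type} (g : Int → α → Int) (c : Int) :
    ∀ (l : List α), (∀ m x, x ∈ l → m ≤ c → g m x ≤ c) → ∀ m, m ≤ c → l.foldl g m ≤ c := by
  intro l
  induction l with
  | nil => intro _ m hm; simpa using hm
  | cons x t ih =>
      intro h m hm
      simpa using ih (fun m' y hy hm' => h m' y (List.mem_cons_of_mem x hy) hm')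
        (g m x) (h m x (List.mem_cons_self ..) hm)

lemma pv_foldl_attains {α : Type} (g : Int → α → Int)
    (hmono : ∀ m x, m ≤ g m x) (v : Int) (x : α) (hx : ∀ m, v ≤ g m x) :
    ∀ (l : List α) (m : Int), x ∈ l → v ≤ l.foldl g m := by
  intro l
  induction l with
  | nil => intro m hm; simp at hm
  | cons y t ih =>
      intro m hm
      rcases List.mem_cons.mp hm with h | h
      · subst h
        exact le_trans (hx m) (pv_foldl_mono g hmono t (g m x))
      · exact ih (g m y) h

lemma pvInner_mono (cs : List Char) (i : Int) : ∀ m j, m ≤ pvInner cs i m j := by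
  intro m j
  unfold pvInner
  split
  · exact le_max_left _ _
  · exact le_refl m

lemma pvOuter_mono (cs : List Char) : ∀ m i, m ≤ pvOuter cs m i :=
  fun m i => pv_foldl_mono _ (pvInner_mono cs i) _ m

lemma pvA_isBound (cs : List Char) : pvBound cs (pvA cs) := by
  constructor
  · unfold pvA
    split
    · exact le_refl _
    · exact pv_foldl_mono _ (pvOuter_mono cs) _ (-1)
  · intro i j hg
    obtain ⟨hij, hjn, heq⟩ := hg
    unfold pvA
    rw [if_neg (by omega)]
    refine pv_foldl_attains (pvOuter cs) (pvOuter_mono cs) ((j : Int) - (i : Int) - 1)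
      (i : Int) ?_ _ (-1) ?_
    · intro m
      refine pv_foldl_attains (pvInner cs (i : Int)) (pvInner_mono cs (i : Int))
        ((j : Int) - (i : Int) - 1) (j : Int) ?_ _ m ?_
      · intro m'
        unfold pvInner
        rw [if_pos (by simp only [PySem.List.pyGetD_natCast]; exact heq)]
        exact le_max_right _ _
      · rw [PySem.List.mem_pyRange_one]
        omega
    · rw [PySem.List.mem_pyRange_one]
      omega

lemma pvA_le (cs : List Char) (c : Int) (hc : pvBound cs c) : pvA cs ≤ c := by
  unfold pvA
  split
  · exact hc.1
  · refine pv_foldl_le (pvOuter cs) c _ ?_ (-1) hc.1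
    intro m i hi hm
    rw [PySem.List.mem_pyRange_one] at hi
    refine pv_foldl_le (pvInner cs i) c _ ?_ m hm
    intro m' j hj hm'
    rw [PySem.List.mem_pyRange_one] at hj
    unfold pvInner
    split
    case isTrue h =>
      refine max_le hm' ?_
      have hieq : i = ((i.toNat : Nat) : Int) := by omega
      have hjeq : j = ((j.toNat : Nat) : Int) := by omega
      rw [hieq, hjeq, PySem.List.pyGetD_natCast, PySem.List.pyGetD_natCast] at h
      have := hc.2 i.toNat j.toNat ⟨by omega, by omega, h⟩
      omega
    case isFalse => exact hm'

lemma pv_A_isBound (s : String) : pvBound s.toList (maxLengthBetweenEqualCharacters_M1 s) := by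
  rw [pvA_eq]; exact pvA_isBound _

lemma pv_A_le (s : String) (c : Int) (hc : pvBound s.toList c) :
    maxLengthBetweenEqualCharacters_M1 s ≤ c := by
  rw [pvA_eq]; exact pvA_le _ c hc

lemma pv_B_snd_mono : ∀ (l : List (Int × Char)) (st : PySem.Dict Char Int × Int),
    st.2 ≤ (l.foldl pvStepB st).2 := by
  intro l
  induction l with
  | nil => intro st; simp
  | cons p t ih =>
      intro st
      refine le_trans ?_ (ih (pvStepB st p))
      unfold pvStepB
      cases st.1.get? p.2 <;> simp

lemma pv_getD_append_len (pre u : List Char) (x : Char) :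
    (pre ++ x :: u).getD pre.length ' ' = x := by
  simp [List.getD]

lemma pv_B_upper (cs : List Char) (c : Int) (hb : pvBound cs c) :
    ∀ (u pre : List Char) (d : PySem.Dict Char Int) (best : Int),
      cs = pre ++ u →
      (∀ ch f, d.get? ch = some f → ∃ k : Nat, f = (k : Int) ∧ k < pre.length ∧ cs.getD k ' ' = ch) →
      best ≤ c →
      ((PySem.List.enumerate u (pre.length : Int)).foldl pvStepB (d, best)).2 ≤ c := by
  intro u
  induction u with
  | nil =>
      intro pre d best hcs hd hbest
      simpa [PySem.List.enumerate_nil] using hbest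
  | cons x u ih =>
      intro pre d best hcs hd hbest
      rw [PySem.List.enumerate_cons, List.foldl_cons]
      have hgdt : cs.getD pre.length ' ' = x := by
        rw [hcs]; exact pv_getD_append_len pre u x
      have hlen1 : (pre.length : Int) + 1 = (((pre ++ [x]).length : Nat) : Int) := by simp
      have hcs' : cs = (pre ++ [x]) ++ u := by rw [hcs]; simp
      cases hget : d.get? x with
      | some f =>
          have hstep : pvStepB (d, best) ((pre.length : Int), x)
              = (d, max best ((pre.length : Int) - f - 1)) := by
            simp [pvStepB, hget]
          rw [hstep, hlen1]
          refine ih (pre ++ [x]) d _ hcs' ?_ ?_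
          · intro ch f' hf'
            obtain ⟨k, h1, h2, h3⟩ := hd ch f' hf'
            exact ⟨k, h1, by simp; omega, h3⟩
          · obtain ⟨k, hfk, hk, hch⟩ := hd x f hget
            refine max_le hbest ?_
            have hgd : pvGood cs k pre.length :=
              ⟨hk, by rw [hcs]; simp, by rw [hch.trans hgdt.symm]⟩
            have := hb.2 k pre.length hgd
            omega
      | none =>
          have hstep : pvStepB (d, best) ((pre.length : Int), x)
              = (d.insert x (pre.length : Int), best) := by
            simp [pvStepB, hget]
          rw [hstep, hlen1]
          refine ih (pre ++ [x]) _ best hcs' ?_ hbest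
          intro ch f hf
          by_cases hchx : ch = x
          · subst hchx
            rw [PySem.Dict.get?_insert_self] at hf
            injection hf with hf
            exact ⟨pre.length, hf.symm, by simp, hgdt⟩
          · rw [PySem.Dict.get?_insert_of_ne] at hf
            · obtain ⟨k, h1, h2, h3⟩ := hd ch f hf
              exact ⟨k, h1, by simp; omega, h3⟩
            · exact hchx

lemma pv_B_lower (cs : List Char) :
    ∀ (u pre : List Char) (d : PySem.Dict Char Int) (best : Int),
      cs = pre ++ u →
      (∀ ch f, d.get? ch = some f → ∃ k : Nat, f = (k : Int) ∧ k < pre.length ∧ cs.getD k ' ' = ch) →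
      (∀ k : Nat, k < pre.length → ∃ f : Int, d.get? (cs.getD k ' ') = some f ∧ f ≤ (k : Int)) →
      (∀ i j : Nat, pvGood cs i j → j < pre.length → (j : Int) - (i : Int) - 1 ≤ best) →
      ∀ i j : Nat, pvGood cs i j →
        (j : Int) - (i : Int) - 1 ≤ ((PySem.List.enumerate u (pre.length : Int)).foldl pvStepB (d, best)).2 := by
  intro u
  induction u with
  | nil =>
      intro pre d best hcs _ _ hbest i j hg
      have hj : j < pre.length := by
        have := hg.2.1
        rw [hcs] at this
        simpa using this
      simpa [PySem.List.enumerate_nil] using hbest i j hg hj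
  | cons x u ih =>
      intro pre d best hcs hsound hcompl hbest i j hg
      rw [PySem.List.enumerate_cons, List.foldl_cons]
      have hgdt : cs.getD pre.length ' ' = x := by
        rw [hcs]; exact pv_getD_append_len pre u x
      have hlen1 : (pre.length : Int) + 1 = (((pre ++ [x]).length : Nat) : Int) := by simp
      have hcs' : cs = (pre ++ [x]) ++ u := by rw [hcs]; simp
      cases hget : d.get? x with
      | some f =>
          have hstep : pvStepB (d, best) ((pre.length : Int), x)
              = (d, max best ((pre.length : Int) - f - 1)) := by
            simp [pvStepB, hget]
          rw [hstep, hlen1]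
          obtain ⟨k0, hf0, hk0, hch0⟩ := hsound x f hget
          refine ih (pre ++ [x]) d _ hcs' ?_ ?_ ?_ i j hg
          · intro ch f' hf'
            obtain ⟨k, h1, h2, h3⟩ := hsound ch f' hf'
            exact ⟨k, h1, by simp; omega, h3⟩
          · intro k hk
            simp only [List.length_append, List.length_cons, List.length_nil] at hk
            by_cases hkt : k < pre.length
            · exact hcompl k hkt
            · have hke : k = pre.length := by omega
              subst hke
              rw [hgdt]
              exact ⟨f, hget, by omega⟩
          · intro i' j' hg' hj'
            simp only [List.length_append, List.length_cons, List.length_nil] at hj'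
            by_cases hjt : j' < pre.length
            · exact le_trans (hbest i' j' hg' hjt) (le_max_left _ _)
            · have hje : j' = pre.length := by omega
              subst hje
              have heq' : cs.getD i' ' ' = x := by rw [← hgdt]; exact hg'.2.2
              obtain ⟨f', hf', hle⟩ := hcompl i' hg'.1
              rw [heq', hget] at hf'
              injection hf' with hff
              refine le_trans ?_ (le_max_right _ _)
              omega
      | none =>
          have hstep : pvStepB (d, best) ((pre.length : Int), x)
              = (d.insert x (pre.length : Int), best) := by
            simp [pvStepB, hget]
          rw [hstep, hlen1]
          refine ih (pre ++ [x]) _ best hcs' ?_ ?_ ?_ i j hg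
          · intro ch f hf
            by_cases hchx : ch = x
            · subst hchx
              rw [PySem.Dict.get?_insert_self] at hf
              injection hf with hf
              exact ⟨pre.length, hf.symm, by simp, hgdt⟩
            · rw [PySem.Dict.get?_insert_of_ne] at hf
              · obtain ⟨k, h1, h2, h3⟩ := hsound ch f hf
                exact ⟨k, h1, by simp; omega, h3⟩
              · exact hchx
          · intro k hk
            simp only [List.length_append, List.length_cons, List.length_nil] at hk
            by_cases hkt : k < pre.length
            · obtain ⟨f', hf', hle⟩ := hcompl k hkt
              have hne : cs.getD k ' ' ≠ x := by
                intro hx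
                rw [hx, hget] at hf'
                cases hf'
              refine ⟨f', ?_, hle⟩
              rw [PySem.Dict.get?_insert_of_ne]
              · exact hf'
              · exact hne
            · have hke : k = pre.length := by omega
              subst hke
              rw [hgdt]
              exact ⟨(pre.length : Int), PySem.Dict.get?_insert_self .., le_refl _⟩
          · intro i' j' hg' hj'
            simp only [List.length_append, List.length_cons, List.length_nil] at hj'
            by_cases hjt : j' < pre.length
            · exact hbest i' j' hg' hjt
            · have hje : j' = pre.length := by omega
              subst hje
              exfalso
              have heq' : cs.getD i' ' ' = x := by rw [← hgdt]; exact hg'.2.2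
              obtain ⟨f', hf', _⟩ := hcompl i' hg'.1
              rw [heq', hget] at hf'
              cases hf'

lemma pv_B_isBound (s : String) : pvBound s.toList (maxLengthBetweenEqualCharacters_M1_alt s) := by
  constructor
  · unfold maxLengthBetweenEqualCharacters_M1_alt
    exact pv_B_snd_mono _ (PySem.Dict.empty, -1)
  · intro i j hg
    unfold maxLengthBetweenEqualCharacters_M1_alt
    have h := pv_B_lower s.toList s.toList [] PySem.Dict.empty (-1) (by simp)
      (by intro ch f hf; rw [PySem.Dict.get?_empty] at hf; cases hf)
      (by intro k hk; simp at hk)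
      (by intro i' j' _ hj'; simp at hj')
      i j hg
    simpa using h

lemma pv_B_le (s : String) (c : Int) (hc : pvBound s.toList c) :
    maxLengthBetweenEqualCharacters_M1_alt s ≤ c := by
  unfold maxLengthBetweenEqualCharacters_M1_alt
  have h := pv_B_upper s.toList c hc s.toList [] PySem.Dict.empty (-1) (by simp)
    (by intro ch f hf; rw [PySem.Dict.get?_empty] at hf; cases hf) hc.1
  simpa using h

-- ===== VERDICT (by name: the statement is the Claim_ definition above) =====
theorem maxLengthBetweenEqualCharacters_M1_spec : Claim_equal_maxLengthBetweenEqualCharacters_M1 := by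
  intro s _
  unfold Spec_maxLengthBetweenEqualCharacters_M1
  exact le_antisymm (pv_A_le s _ (pv_B_isBound s)) (pv_B_le s _ (pv_A_isBound s))
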